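-- pv_equiv track=rewrite | github.com/derasoft004/isb | lab_2/task_2/functions_assistant.py | substring_in_sentence
-- ===== SOURCE A (Python) =====
-- def substring_in_sentence(sequence: str) -> int:
--     """
--     the function helper for finding max length of substring from sequence
--     :param sequence: bit sequence
--     :return: max length of substring
--     """
--     counter_dict = dict((str(i), 0) for i in range(1, 5))
--     count, max_len = 0, 1
--     sequence_not_null = False
--
--     def adder(c):
--         if c in range(1, 5):
--             counter_dict[str(c)] += 1
--         elif c >= 5:
--             counter_dict['4'] += 1
--
--     for ind in range(len(sequence)):
--         if int(sequence[ind]):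
--             sequence_not_null = True
--             count += 1
--         else:
--             adder(count)
--             count = 0
--     if sequence_not_null:
--         adder(count)
--         max_len = max(int(key) for key, value in counter_dict.items() if value)
--     return max_len
-- ===== SOURCE B (Python) =====
-- def substring_in_sentence(sequence: str) -> int:
--     """Single pass tracking the running maximum run of non-zero digits;
--     returns 1 for an all-zero (or empty) sequence, else the max run capped at 4."""
--     count = 0
--     max_run = 0
--     any_nonzero = False
--     for ch in sequence:
--         if int(ch):
--             count += 1
--             any_nonzero = True
--             if count > max_run:
--                 max_run = count
--         else:
--             count = 0
--     return min(max_run, 4) if any_nonzero else 1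
-- ===== Notes on version B (the rewrite author's own statement) =====
-- stated objective: simpler
-- what changed: Replaces the histogram dict of capped run lengths plus a final max-over-nonzero-keys with a single running-max scan (count, max_run, any_nonzero) and returns min(max_run, 4) directly.
import Mathlib
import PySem

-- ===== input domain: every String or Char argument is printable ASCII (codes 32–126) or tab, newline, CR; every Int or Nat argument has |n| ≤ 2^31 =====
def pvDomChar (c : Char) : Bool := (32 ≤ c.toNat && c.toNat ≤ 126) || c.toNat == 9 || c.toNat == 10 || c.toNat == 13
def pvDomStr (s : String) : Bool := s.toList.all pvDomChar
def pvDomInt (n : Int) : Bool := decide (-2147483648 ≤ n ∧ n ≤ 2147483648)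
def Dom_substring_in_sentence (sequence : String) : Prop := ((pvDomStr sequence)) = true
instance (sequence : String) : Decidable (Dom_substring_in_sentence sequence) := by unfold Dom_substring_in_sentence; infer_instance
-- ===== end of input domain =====

-- B replaces A's histogram dict of capped run lengths (+ max over non-zero keys) with a
-- single running-max scan; objective: simpler.

-- ===== PORT A =====
-- int(sequence[ind]) for one character; inside Pre_ the character is a digit so the
-- Option is always some (getD 0 is never the raising case there)
def pvCharInt (c : Char) : Int := (PySem.Int.ofChars? [c]).getD 0

-- the nested 'adder' closure of A
def pvAdder (cd : PySem.Dict String Int) (c : Int) : PySem.Dict String Int :=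
  if 1 ≤ c ∧ c < 5 then cd.modify (PySem.Int.toStr c) 0 (· + 1)
  else if 5 ≤ c then cd.modify "4" 0 (· + 1)
  else cd

-- one iteration of A's 'for ind in range(len(sequence))' loop (state: counter_dict, count, sequence_not_null);
-- indexing sequence[ind] over range(len(sequence)) visits exactly the characters in order
def pvStepA (s : PySem.Dict String Int × Int × Bool) (ch : Char) :
    PySem.Dict String Int × Int × Bool :=
  if pvCharInt ch ≠ 0 then (s.1, s.2.1 + 1, true)
  else (pvAdder s.1 s.2.1, 0, s.2.2)

-- A's code after the loop (max_len stays 1 unless sequence_not_null)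
def pvFinA (s : PySem.Dict String Int × Int × Bool) : Int :=
  if s.2.2 then
    let cd := pvAdder s.1 s.2.1
    (PySem.List.max?
      ((cd.items.filter (fun kv => decide (kv.2 ≠ 0))).map
        (fun kv => (PySem.Int.ofStr? kv.1).getD 0))
      (fun x => x)).getD 1
  else 1

def substring_in_sentence (sequence : String) : Int :=
  let counter0 : PySem.Dict String Int :=
    (PySem.List.pyRange 1 5 1).foldl
      (fun d i => d.insert (PySem.Int.toStr i) 0) PySem.Dict.empty
  pvFinA (sequence.toList.foldl pvStepA (counter0, 0, false))

-- ===== PORT B =====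
-- one iteration of B's loop (state: count, max_run, any_nonzero)
def pvStepB (s : Int × Int × Bool) (ch : Char) : Int × Int × Bool :=
  if pvCharInt ch ≠ 0 then
    (s.1 + 1, if s.1 + 1 > s.2.1 then s.1 + 1 else s.2.1, true)
  else (0, s.2.1, s.2.2)

def pvFinB (s : Int × Int × Bool) : Int :=
  if s.2.2 then min s.2.1 4 else 1

def substring_in_sentence_alt (sequence : String) : Int :=
  pvFinB (sequence.toList.foldl pvStepB (0, 0, false))

-- ===== PRECONDITION & SPEC =====
-- Pre_ excludes exactly the strings containing a non-digit character: there Python's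
-- int(sequence[ind]) raises ValueError (in A and in B alike)
def Pre_substring_in_sentence (sequence : String) : Prop :=
  (sequence.toList.all (fun c => decide ('0' ≤ c ∧ c ≤ '9'))) = true
instance (sequence : String) : Decidable (Pre_substring_in_sentence sequence) := by
  unfold Pre_substring_in_sentence; infer_instance

def pvWitness_substring_in_sentence : String := "10"

def Spec_substring_in_sentence (sequence : String) (out : Int) : Prop :=
  out = substring_in_sentence_alt sequence
instance (sequence : String) (out : Int) : Decidable (Spec_substring_in_sentence sequence out) := by
  unfold Spec_substring_in_sentence; infer_instance

-- ===== CLAIM (what is proved, stated in full; the proofs are below) =====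
def Claim_equal_substring_in_sentence : Prop :=
  ∀ (sequence : String), Dom_substring_in_sentence sequence →
    Pre_substring_in_sentence sequence →
    Spec_substring_in_sentence sequence (substring_in_sentence sequence)

-- ===== LEMMAS AND PROOFS =====

-- A's counter_dict always has exactly the keys "1".."4": a concrete quadruple of values
def pvQuad (a b c d : Int) : PySem.Dict String Int :=
  PySem.Dict.mk [("1", a), ("2", b), ("3", c), ("4", d)]

-- the largest key of pvQuad with a non-zero value (0 if none)
def pvMk (a b c d : Int) : Int :=
  if d ≠ 0 then 4 else if c ≠ 0 then 3 else if b ≠ 0 then 2 else if a ≠ 0 then 1 else 0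

theorem pvAdder_quad (a b c d n : Int) :
    pvAdder (pvQuad a b c d) n =
      pvQuad (if n = 1 then a + 1 else a) (if n = 2 then b + 1 else b)
        (if n = 3 then c + 1 else c) (if 4 ≤ n then d + 1 else d) := by
  unfold pvAdder
  by_cases h1 : n = 1
  · subst h1
    norm_num [pvQuad, PySem.Dict.modify, PySem.Dict.insert, PySem.Dict.getD, PySem.Dict.get?,
      PySem.Dict.contains, show PySem.Int.toStr (1 : Int) = "1" from by decide]
    simp
  by_cases h2 : n = 2
  · subst h2
    norm_num [pvQuad, PySem.Dict.modify, PySem.Dict.insert, PySem.Dict.getD, PySem.Dict.get?,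
      PySem.Dict.contains, show PySem.Int.toStr (2 : Int) = "2" from by decide]
    simp [List.find?]
  by_cases h3 : n = 3
  · subst h3
    norm_num [pvQuad, PySem.Dict.modify, PySem.Dict.insert, PySem.Dict.getD, PySem.Dict.get?,
      PySem.Dict.contains, show PySem.Int.toStr (3 : Int) = "3" from by decide]
    simp [List.find?]
  by_cases h4 : n = 4
  · subst h4
    norm_num [pvQuad, PySem.Dict.modify, PySem.Dict.insert, PySem.Dict.getD, PySem.Dict.get?,
      PySem.Dict.contains, show PySem.Int.toStr (4 : Int) = "4" from by decide]
    simp [List.find?]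
  by_cases h5 : 5 ≤ n
  · rw [if_neg (by omega), if_pos h5, if_neg h1, if_neg h2, if_neg h3,
      if_pos (by omega : (4 : Int) ≤ n)]
    norm_num [pvQuad, PySem.Dict.modify, PySem.Dict.insert, PySem.Dict.getD, PySem.Dict.get?,
      PySem.Dict.contains]
    simp [List.find?]
  · rw [if_neg (by omega), if_neg (by omega)]
    rw [if_neg h1, if_neg h2, if_neg h3, if_neg (by omega)]

theorem pvMk_adder (a b c d n : Int) (ha : 0 ≤ a) (hb : 0 ≤ b) (hc : 0 ≤ c) (hd : 0 ≤ d)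
    (hn : 0 ≤ n) :
    pvMk (if n = 1 then a + 1 else a) (if n = 2 then b + 1 else b)
        (if n = 3 then c + 1 else c) (if 4 ≤ n then d + 1 else d) =
      max (pvMk a b c d) (min n 4) := by
  simp only [pvMk]
  split_ifs <;> omega

theorem pvFinA_quad (a b c d : Int) (_ha : 0 ≤ a) (_hb : 0 ≤ b) (_hc : 0 ≤ c) (_hd : 0 ≤ d)
    (hne : pvMk a b c d ≠ 0) :
    (PySem.List.max?
      (((pvQuad a b c d).items.filter (fun kv => decide (kv.2 ≠ 0))).map
        (fun kv => (PySem.Int.ofStr? kv.1).getD 0))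
      (fun x => x)).getD 1 = pvMk a b c d := by
  have e1 : (PySem.Int.ofStr? "1").getD 0 = (1 : Int) := by decide
  have e2 : (PySem.Int.ofStr? "2").getD 0 = (2 : Int) := by decide
  have e3 : (PySem.Int.ofStr? "3").getD 0 = (3 : Int) := by decide
  have e4 : (PySem.Int.ofStr? "4").getD 0 = (4 : Int) := by decide
  by_cases h1 : a = 0 <;> by_cases h2 : b = 0 <;> by_cases h3 : c = 0 <;> by_cases h4 : d = 0 <;>
    simp_all [pvQuad, pvMk, PySem.List.max?]

theorem pvLoop_eq (l : List Char) (a b c d count maxrun : Int) (nn : Bool)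
    (ha : 0 ≤ a) (hb : 0 ≤ b) (hc : 0 ≤ c) (hd : 0 ≤ d) (hcount : 0 ≤ count)
    (hnn : nn = false → a = 0 ∧ b = 0 ∧ c = 0 ∧ d = 0 ∧ count = 0 ∧ maxrun = 0)
    (hnt : nn = true → 1 ≤ maxrun)
    (hmk : max (pvMk a b c d) (min count 4) = min maxrun 4) :
    pvFinA (l.foldl pvStepA (pvQuad a b c d, count, nn)) =
      pvFinB (l.foldl pvStepB (count, maxrun, nn)) := by
  induction l generalizing a b c d count maxrun nn with
  | nil =>
    cases nn with
    | false =>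
      obtain ⟨h1, h2, h3, h4, h5, h6⟩ := hnn rfl
      subst h1; subst h2; subst h3; subst h4; subst h5; subst h6
      simp [pvFinA, pvFinB]
    | true =>
      have hm1 := hnt rfl
      simp only [List.foldl]
      show pvFinA (pvQuad a b c d, count, true) = pvFinB (count, maxrun, true)
      unfold pvFinA pvFinB
      simp only [if_true]
      rw [pvAdder_quad]
      rw [pvFinA_quad _ _ _ _ (by split_ifs <;> omega) (by split_ifs <;> omega)
        (by split_ifs <;> omega) (by split_ifs <;> omega)
        (by rw [pvMk_adder a b c d count ha hb hc hd hcount]; omega)]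
      rw [pvMk_adder a b c d count ha hb hc hd hcount]
      omega
  | cons ch t ih =>
    simp only [List.foldl]
    by_cases h : pvCharInt ch = 0
    · have sA : pvStepA (pvQuad a b c d, count, nn) ch = (pvAdder (pvQuad a b c d) count, 0, nn) := by
        simp [pvStepA, h]
      have sB : pvStepB (count, maxrun, nn) ch = (0, maxrun, nn) := by
        simp [pvStepB, h]
      rw [sA, sB, pvAdder_quad]
      apply ih
      · split_ifs <;> omega
      · split_ifs <;> omega
      · split_ifs <;> omega
      · split_ifs <;> omega
      · omega
      · intro hf
        obtain ⟨h1, h2, h3, h4, h5, h6⟩ := hnn hf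
        subst h1; subst h2; subst h3; subst h4; subst h5
        norm_num [h6]
      · exact hnt
      · rw [pvMk_adder a b c d count ha hb hc hd hcount]
        omega
    · have sA : pvStepA (pvQuad a b c d, count, nn) ch = (pvQuad a b c d, count + 1, true) := by
        simp [pvStepA, h]
      have sB : pvStepB (count, maxrun, nn) ch =
          (count + 1, if count + 1 > maxrun then count + 1 else maxrun, true) := by
        simp [pvStepB, h]
      rw [sA, sB]
      apply ih
      · exact ha
      · exact hb
      · exact hc
      · exact hd
      · omega
      · intro hf; exact absurd hf (by simp)
      · intro _
        rcases Bool.eq_false_or_eq_true nn with ht | hf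
        · have := hnt ht; split_ifs <;> omega
        · obtain ⟨h1, h2, h3, h4, h5, h6⟩ := hnn hf; split_ifs <;> omega
      · split_ifs <;> omega

-- ===== VERDICT (by name: the statement is the Claim_ definition above) =====
theorem substring_in_sentence_spec : Claim_equal_substring_in_sentence := by
  intro seq _ _
  unfold Spec_substring_in_sentence substring_in_sentence substring_in_sentence_alt
  have h0 : ((PySem.List.pyRange 1 5 1).foldl
      (fun d i => d.insert (PySem.Int.toStr i) 0) PySem.Dict.empty) = pvQuad 0 0 0 0 := by
    decide
  rw [h0]
  exact pvLoop_eq seq.toList 0 0 0 0 0 0 false (by omega) (by omega) (by omega) (by omega)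
    (by omega) (fun _ => ⟨rfl, rfl, rfl, rfl, rfl, rfl⟩) (by simp) (by decide)
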